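-- pv_equiv track=rewrite | github.com/davidhuotkeo/TEDx-Volunteer-Shortlist-Data-Cleaning | modify_name.py | get_name_neatly
-- ===== SOURCE A (Python) =====
-- def get_name_neatly(list_name):
--     result = ""
--     number_volunteer = len(list_name)
--     if number_volunteer < 10:
--         return "\n".join(list_name)
--     cols = int(number_volunteer / 10)
--     counter = 0
--     for name in list_name:
--         result += name + "\t"
--         counter += 1
--         if counter == 3:
--             counter = 0
--             result += "\n"
--     return result
-- ===== SOURCE B (Python) =====
-- def get_name_neatly(list_name):
--     if len(list_name) < 10:
--         return "\n".join(list_name)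
--     pieces = []
--     for i in range(0, len(list_name), 3):
--         chunk = list_name[i:i + 3]
--         piece = "\t".join(chunk) + "\t"
--         if len(chunk) == 3:
--             piece += "\n"
--         pieces.append(piece)
--     return "".join(pieces)
-- ===== Notes on version B (the rewrite author's own statement) =====
-- stated objective: simpler
-- what changed: Replaces the per-name modular counter and running string accumulation with chunking the list into groups of three, formatting each group with a tab join (plus a newline only for full groups) and concatenating the pieces; the unused cols computation is dropped.
import Mathlib
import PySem

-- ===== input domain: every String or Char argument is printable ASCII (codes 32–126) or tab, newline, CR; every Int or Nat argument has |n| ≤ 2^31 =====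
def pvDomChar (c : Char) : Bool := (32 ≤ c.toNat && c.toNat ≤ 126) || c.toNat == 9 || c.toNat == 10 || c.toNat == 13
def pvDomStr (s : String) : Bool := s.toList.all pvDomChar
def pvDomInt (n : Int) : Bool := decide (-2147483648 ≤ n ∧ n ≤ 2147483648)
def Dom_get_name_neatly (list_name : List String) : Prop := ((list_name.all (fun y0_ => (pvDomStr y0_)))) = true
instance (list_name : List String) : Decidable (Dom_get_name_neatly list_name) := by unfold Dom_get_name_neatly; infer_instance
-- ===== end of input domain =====

-- B formats the list by slicing it into chunks of three and joining, instead of A's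
-- per-name counter loop; same output, simpler decomposition (the unused `cols` is dropped).

-- ===== PORT A =====
-- A's `cols = int(number_volunteer / 10)` is computed but never used; it is omitted here.
-- the loop body of A's `for name in list_name`, on state (result, counter)
def pvStepA (st : String × Int) (name : String) : String × Int :=
  let result := st.1 ++ name ++ "\t"
  let counter := st.2 + 1
  if counter == 3 then (result ++ "\n", 0) else (result, counter)

def get_name_neatly (list_name : List String) : String :=
  if list_name.length < 10 then PySem.Str.join "\n" list_name
  else (list_name.foldl pvStepA ("", 0)).1

-- ===== PORT B =====
-- chunks of three consecutive names (Source B's `list_name[i:i+3]` slices, i = 0, 3, 6, …)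
def pvChunks3 : List String → List (List String)
  | [] => []
  | a :: b :: c :: rest => [a, b, c] :: pvChunks3 rest
  | xs => [xs]

def get_name_neatly_alt (list_name : List String) : String :=
  if list_name.length < 10 then PySem.Str.join "\n" list_name
  else
    String.join ((pvChunks3 list_name).map
      (fun chunk =>
        let piece := PySem.Str.join "\t" chunk ++ "\t"
        if chunk.length == 3 then piece ++ "\n" else piece))

-- ===== PRECONDITION & SPEC =====
def Spec_get_name_neatly (list_name : List String) (out : String) : Prop := out = get_name_neatly_alt list_name
instance (list_name : List String) (out : String) : Decidable (Spec_get_name_neatly list_name out) := by unfold Spec_get_name_neatly; infer_instance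

-- ===== CLAIM (what is proved, stated in full; the proofs are below) =====
def Claim_equal_get_name_neatly : Prop := ∀ (list_name : List String), Dom_get_name_neatly list_name → Spec_get_name_neatly list_name (get_name_neatly list_name)

-- ===== LEMMAS AND PROOFS =====

-- the shape of B's big-branch output, as a function of the list
def pvRender (l : List String) : String :=
  String.join ((pvChunks3 l).map
    (fun chunk =>
      let piece := PySem.Str.join "\t" chunk ++ "\t"
      if chunk.length == 3 then piece ++ "\n" else piece))

theorem pvStepA_zero (s n : String) : pvStepA (s, 0) n = (s ++ n ++ "\t", 1) := by
  simp [pvStepA]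
theorem pvStepA_one (s n : String) : pvStepA (s, 1) n = (s ++ n ++ "\t", 2) := by
  simp [pvStepA]
theorem pvStepA_two (s n : String) : pvStepA (s, 2) n = (s ++ n ++ "\t" ++ "\n", 0) := by
  simp [pvStepA]

theorem pvFoldl_append (l : List String) (a : String) :
    l.foldl (fun r s => r ++ s) a = a ++ l.foldl (fun r s => r ++ s) "" := by
  induction l generalizing a with
  | nil => simp
  | cons x t ih =>
      simp only [List.foldl_cons]
      rw [ih (a ++ x), ih ("" ++ x)]
      apply String.toList_inj.mp
      simp [String.toList_append]

theorem pvJoin_cons (a : String) (l : List String) :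
    String.join (a :: l) = a ++ String.join l := by
  show List.foldl _ _ _ = _
  rw [List.foldl_cons, pvFoldl_append]
  apply String.toList_inj.mp
  simp [String.toList_append, String.join]

theorem pvFold_eq_render (l : List String) (acc : String) :
    (l.foldl pvStepA (acc, 0)).1 = acc ++ pvRender l := by
  induction l using pvChunks3.induct generalizing acc with
  | case1 =>
      apply String.toList_inj.mp
      simp [pvRender, pvChunks3, String.toList_append]
  | case2 a b c rest ih =>
      simp only [List.foldl_cons, pvStepA_zero, pvStepA_one, pvStepA_two]
      rw [ih]
      apply String.toList_inj.mp
      simp [pvRender, pvChunks3, pvJoin_cons, PySem.Str.join, String.toList_append,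
        PySem.Chars.join_cons_cons, PySem.Chars.join_singleton]
  | case3 xs h1 h2 =>
      cases xs with
      | nil => exact absurd rfl h1
      | cons a t =>
        cases t with
        | nil =>
            simp only [List.foldl_cons, List.foldl_nil, pvStepA_zero]
            apply String.toList_inj.mp
            simp [pvRender, pvChunks3, pvJoin_cons, PySem.Str.join, String.toList_append,
              PySem.Chars.join_singleton]
        | cons b t2 =>
          cases t2 with
          | nil =>
              simp only [List.foldl_cons, List.foldl_nil, pvStepA_zero, pvStepA_one]
              apply String.toList_inj.mp
              simp [pvRender, pvChunks3, pvJoin_cons, PySem.Str.join, String.toList_append,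
                PySem.Chars.join_cons_cons, PySem.Chars.join_singleton]
          | cons c t3 => exact absurd rfl (h2 a b c t3)

-- ===== VERDICT (by name: the statement is the Claim_ definition above) =====
theorem get_name_neatly_spec : Claim_equal_get_name_neatly := by
  intro l _
  unfold Spec_get_name_neatly get_name_neatly get_name_neatly_alt
  split
  · rfl
  · rw [pvFold_eq_render]
    simp [pvRender]
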